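-- pv_equiv track=rewrite | github.com/lucianosekulic/GCO | GCO/modelos basado en contenidos/modelo_contenido.py | calcular_similitud
-- ===== SOURCE A (Python) =====
-- def calcular_similitud(w: list[dict[str]]) -> list[list[int]]:
--     resultado: list[list[int]] = list[list[int]]()
--     for documento_original in w:
--         original: list[int] = list(documento_original.values())
--         values: list[int]() = list[int]()
--         for documento_comparado in w:
--             sim: int = 0
--             comparacion: list[int] = list(documento_comparado.values())
--             if len(original) > len(comparacion):
--                 for i in range(len(comparacion)):
--                     sim += comparacion[i] * original[i]
--             else:
--                 for i in range(len(original)):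
--                     sim += comparacion[i] * original[i]
--             values.append(sim)
--         resultado.append(values)
--     return resultado
-- ===== SOURCE B (Python) =====
-- def calcular_similitud(w: list[dict[str]]) -> list[list[int]]:
--     vecs = [list(d.values()) for d in w]
--     n = len(vecs)
--     # upper triangle only: tri[i][j-i] = dot(vecs[i], vecs[j]) for j >= i
--     tri = [[sum(a * b for a, b in zip(vecs[i], vecs[j])) for j in range(i, n)]
--            for i in range(n)]
--     # dot is symmetric under zip truncation, so read every entry off the triangle
--     return [[tri[min(i, j)][abs(i - j)] for j in range(n)] for i in range(n)]
-- ===== Notes on version B (the rewrite author's own statement) =====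
-- stated objective: alternative
-- what changed: Instead of A's flat double loop that recomputes each value list and computes every dot product twice with a length branch and an indexed inner loop, B extracts the value vectors once, computes only the upper triangle of zip-truncated dot products, and reads the full matrix back off the triangle via the symmetry dot(i,j)=dot(j,i).
import Mathlib
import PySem

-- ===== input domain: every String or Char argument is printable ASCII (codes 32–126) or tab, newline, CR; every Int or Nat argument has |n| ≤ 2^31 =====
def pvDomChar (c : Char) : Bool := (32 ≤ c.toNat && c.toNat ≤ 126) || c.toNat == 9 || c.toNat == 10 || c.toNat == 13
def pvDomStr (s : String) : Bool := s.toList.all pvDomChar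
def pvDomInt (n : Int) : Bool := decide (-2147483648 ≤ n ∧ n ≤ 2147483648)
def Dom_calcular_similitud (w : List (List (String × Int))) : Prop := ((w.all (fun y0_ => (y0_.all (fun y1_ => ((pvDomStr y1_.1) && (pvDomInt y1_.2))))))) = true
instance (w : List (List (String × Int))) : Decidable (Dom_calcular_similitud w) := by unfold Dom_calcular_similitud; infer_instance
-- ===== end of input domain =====

-- B replaces A's flat symmetric double loop (each dot product computed twice, with a
-- length branch and an indexed inner loop) by an upper-triangular table of zip-truncated
-- dot products read back symmetrically; objective: alternative decomposition.

-- ===== PORT A =====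
-- inner indices i run over range(len(...)) and are always in range, so List.getD is exact
def calcular_similitud (w : List (List (String × Int))) : List (List Int) :=
  w.foldl (fun resultado documento_original =>
    let original : List Int := (PySem.Dict.ofList documento_original).values
    let values : List Int := w.foldl (fun values documento_comparado =>
      let comparacion : List Int := (PySem.Dict.ofList documento_comparado).values
      let sim : Int :=
        if original.length > comparacion.length then
          (List.range comparacion.length).foldl
            (fun sim i => sim + comparacion.getD i 0 * original.getD i 0) 0
        else
          (List.range original.length).foldl
            (fun sim i => sim + comparacion.getD i 0 * original.getD i 0) 0
      values ++ [sim]) []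
    resultado ++ [values]) []

-- ===== PORT B =====
-- sum(a*b for a, b in zip(u, v))
def zipdot (u v : List Int) : Int := (u.zip v).foldl (fun s p => s + p.1 * p.2) 0

-- range(i, n) with 0 ≤ i ≤ n is ported as List.range' i (n - i) (exact on these Nat bounds)
def calcular_similitud_alt (w : List (List (String × Int))) : List (List Int) :=
  let vecs : List (List Int) := w.map (fun d => (PySem.Dict.ofList d).values)
  let n := vecs.length
  let tri : List (List Int) := (List.range n).map (fun i =>
    (List.range' i (n - i)).map (fun j => zipdot (vecs.getD i []) (vecs.getD j [])))
  (List.range n).map (fun i => (List.range n).map (fun j =>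
    (tri.getD (min i j) []).getD (max i j - min i j) 0))

-- ===== PRECONDITION & SPEC =====
def Spec_calcular_similitud (w : List (List (String × Int))) (out : List (List Int)) : Prop := out = calcular_similitud_alt w
instance (w : List (List (String × Int))) (out : List (List Int)) : Decidable (Spec_calcular_similitud w out) := by unfold Spec_calcular_similitud; infer_instance

-- ===== CLAIM (what is proved, stated in full; the proofs are below) =====
def Claim_equal_calcular_similitud : Prop := ∀ (w : List (List (String × Int))), Dom_calcular_similitud w → Spec_calcular_similitud w (calcular_similitud w)

-- ===== LEMMAS AND PROOFS =====

-- append-accumulator foldl is a map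
theorem foldl_append_map {α β : Type} (g : α → β) (l : List α) (init : List β) :
    l.foldl (fun acc x => acc ++ [g x]) init = init ++ l.map g := by
  induction l generalizing init with
  | nil => simp
  | cons x xs ih => simp [List.foldl_cons, ih]

theorem zipdot_acc (u : List Int) : ∀ (v : List Int) (s : Int),
    (u.zip v).foldl (fun s p => s + p.1 * p.2) s = s + zipdot u v := by
  induction u with
  | nil => intro v s; simp [zipdot]
  | cons a u ih =>
    intro v s
    cases v with
    | nil => simp [zipdot]
    | cons b v =>
      simp only [zipdot, List.zip_cons_cons, List.foldl_cons]
      rw [ih v (s + a * b), ih v (0 + a * b)]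
      ring

theorem zipdot_comm (u : List Int) : ∀ (v : List Int), zipdot u v = zipdot v u := by
  induction u with
  | nil => intro v; cases v <;> simp [zipdot]
  | cons a u ih =>
    intro v
    cases v with
    | nil => simp [zipdot]
    | cons b v =>
      simp only [zipdot, List.zip_cons_cons, List.foldl_cons]
      rw [zipdot_acc u v, zipdot_acc v u, ih v]
      ring

-- the indexed inner loop up to the min length is the zip dot product
theorem range_fold_acc (u : List Int) : ∀ (v : List Int) (s : Int),
    (List.range (min u.length v.length)).foldl
      (fun s i => s + v.getD i 0 * u.getD i 0) s = s + zipdot u v := by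
  induction u with
  | nil => intro v s; simp [zipdot]
  | cons a u ih =>
    intro v s
    cases v with
    | nil => simp [zipdot]
    | cons b v =>
      have hmin : min (a :: u).length ((b :: v)).length = (min u.length v.length) + 1 := by
        simp [Nat.succ_min_succ]
      rw [hmin, List.range_succ_eq_map, List.foldl_cons, List.foldl_map]
      simp only [List.getD_cons_succ, List.getD_cons_zero]
      rw [ih v (s + b * a)]
      simp only [zipdot, List.zip_cons_cons, List.foldl_cons]
      rw [zipdot_acc u v (0 + a * b),
        show List.foldl (fun s p => s + p.1 * p.2) 0 (u.zip v) = zipdot u v from rfl]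
      ring

-- A's sim expression as a function of the two value vectors
theorem simA_eq_zipdot (u v : List Int) :
    (if u.length > v.length then
       (List.range v.length).foldl (fun s i => s + v.getD i 0 * u.getD i 0) 0
     else
       (List.range u.length).foldl (fun s i => s + v.getD i 0 * u.getD i 0) 0)
    = zipdot u v := by
  split_ifs with h
  · have hm : min u.length v.length = v.length := by omega
    have := range_fold_acc u v 0
    rw [hm] at this; simpa using this
  · have hm : min u.length v.length = u.length := by omega
    have := range_fold_acc u v 0
    rw [hm] at this; simpa using this

-- both ports equal the canonical all-pairs matrix
theorem A_eq_canon (w : List (List (String × Int))) :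
    calcular_similitud w = w.map (fun dO => w.map (fun dC =>
      zipdot (PySem.Dict.ofList dO).values (PySem.Dict.ofList dC).values)) := by
  simp only [calcular_similitud]
  simp only [foldl_append_map, List.nil_append, simA_eq_zipdot]

theorem B_eq_canon (w : List (List (String × Int))) :
    calcular_similitud_alt w = w.map (fun dO => w.map (fun dC =>
      zipdot (PySem.Dict.ofList dO).values (PySem.Dict.ofList dC).values)) := by
  simp only [calcular_similitud_alt]
  have hR : w.map (fun dO => w.map (fun dC =>
      zipdot (PySem.Dict.ofList dO).values (PySem.Dict.ofList dC).values))
      = (w.map (fun d => (PySem.Dict.ofList d).values)).map (fun u =>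
          (w.map (fun d => (PySem.Dict.ofList d).values)).map (fun v => zipdot u v)) := by
    simp [List.map_map, Function.comp]
  rw [hR]
  generalize (w.map (fun d => (PySem.Dict.ofList d).values)) = vecs
  apply List.ext_getElem
  · simp
  · intro i hi1 hi2
    have hi : i < vecs.length := by simpa using hi2
    simp only [List.getElem_map, List.getElem_range, List.length_map, List.length_range] at hi1 ⊢
    apply List.ext_getElem
    · simp
    · intro j hj1 hj2
      have hj : j < vecs.length := by simpa using hj2
      simp only [List.getElem_map, List.getElem_range, List.length_map, List.length_range] at hj1 ⊢
      have hmin : min i j < vecs.length := by omega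
      have htri : ((List.range vecs.length).map (fun i =>
          (List.range' i (vecs.length - i)).map (fun j => zipdot (vecs.getD i []) (vecs.getD j [])))).getD (min i j) []
          = (List.range' (min i j) (vecs.length - min i j)).map
              (fun m => zipdot (vecs.getD (min i j) []) (vecs.getD m [])) := by
        rw [List.getD_eq_getElem _ _ (by simpa using hmin)]
        simp
      rw [htri]
      have hmlt : max i j - min i j < vecs.length - min i j := by omega
      rw [List.getD_eq_getElem _ _ (by simpa using hmlt)]
      simp only [List.getElem_map, List.getElem_range', one_mul]
      have hsum : min i j + (max i j - min i j) = max i j := by omega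
      rw [hsum]
      have hgi : vecs.getD i [] = vecs[i] := List.getD_eq_getElem _ _ hi
      have hgj : vecs.getD j [] = vecs[j] := List.getD_eq_getElem _ _ hj
      rcases Nat.le_total i j with h | h
      · rw [Nat.min_eq_left h, Nat.max_eq_right h, hgi, hgj]
      · rw [Nat.min_eq_right h, Nat.max_eq_left h, hgi, hgj, zipdot_comm]

-- ===== VERDICT (by name: the statement is the Claim_ definition above) =====
theorem calcular_similitud_spec : Claim_equal_calcular_similitud := by
  intro w _
  unfold Spec_calcular_similitud
  rw [A_eq_canon, B_eq_canon]
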